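-- pv_equiv track=rewrite | github.com/awhipp/sudoku-integer-programming-solver | sudoku.py | convert_to_soduku
-- ===== SOURCE A (Python) =====
-- def convert_to_soduku(line, n):
--   sudoku = []
--
--   split = [
--            line[i:i+n] for i in range(0, len(line), n)
--   ]
--
--   for r in split:
--     sudoku.append(
--         [
--          int(r[i:i+1]) for i in range(0, len(r), 1)
--         ]
--     )
--   return sudoku
-- ===== SOURCE B (Python) =====
-- def convert_to_soduku(line, n):
--   if n <= 0:
--     return []  # no positive row length: no rows
--   sudoku = []
--   row = []
--   for c in line:
--     row.append(int(c))
--     if len(row) == n: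
--       sudoku.append(row)
--       row = []
--   if row:
--     sudoku.append(row)
--   return sudoku
-- ===== Notes on version B (the rewrite author's own statement) =====
-- stated objective: alternative
-- what changed: B replaces A's two staged passes (split the string into n-sized substrings, then parse each substring) by a single pass over the characters with a row accumulator that is flushed into the result whenever it reaches length n, the short tail flushed at the end.
import Mathlib
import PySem

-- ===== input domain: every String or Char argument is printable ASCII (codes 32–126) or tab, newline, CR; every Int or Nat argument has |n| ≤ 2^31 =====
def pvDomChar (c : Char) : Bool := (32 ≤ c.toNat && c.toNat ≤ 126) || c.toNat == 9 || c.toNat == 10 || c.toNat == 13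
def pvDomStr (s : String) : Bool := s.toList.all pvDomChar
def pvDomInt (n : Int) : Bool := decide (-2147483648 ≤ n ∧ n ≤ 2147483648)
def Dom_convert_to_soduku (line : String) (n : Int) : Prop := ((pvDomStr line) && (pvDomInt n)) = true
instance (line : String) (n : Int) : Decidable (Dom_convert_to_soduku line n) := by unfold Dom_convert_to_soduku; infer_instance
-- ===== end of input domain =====

-- B replaces A's two staged passes (split into n-sized substrings, then parse each) by a
-- single pass over the characters with a row accumulator flushed at length n; objective: alternative.

-- ===== PORT A =====
def convert_to_soduku (line : String) (n : Int) : List (List Int) :=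
  let cs := line.toList
  let split := (PySem.List.pyRange 0 (PySem.Str.len line) n).map
      (fun i => PySem.List.slice cs (some i) (some (i + n)))
  split.foldl
    (fun sudoku r =>
      sudoku ++ [ (PySem.List.pyRange 0 (PySem.List.len r) 1).map
        (fun i => (PySem.Int.ofChars? (PySem.List.slice r (some i) (some (i + 1)))).getD 0) ])
    []

-- ===== PORT B =====
def convert_to_soduku_alt (line : String) (n : Int) : List (List Int) :=
  if n ≤ 0 then []
  else
    let st := line.toList.foldl
      (fun (st : List (List Int) × List Int) c =>
        let row := st.2 ++ [(PySem.Int.ofChars? [c]).getD 0]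
        if (row.length : Int) = n then (st.1 ++ [row], ([] : List Int)) else (st.1, row))
      ([], [])
    if st.2 ≠ [] then st.1 ++ [st.2] else st.1

-- ===== PRECONDITION & SPEC =====
-- Pre_ excludes exactly the inputs where Python A raises ValueError: n = 0 (range step zero),
-- and n > 0 with a non-digit character in line (int() fails); for n < 0 A's loop body never
-- runs, so any line is admitted there.
def Pre_convert_to_soduku (line : String) (n : Int) : Prop :=
  n ≠ 0 ∧ (0 < n → line.toList.all PySem.Chars.isdigit = true)
instance (line : String) (n : Int) : Decidable (Pre_convert_to_soduku line n) := by
  unfold Pre_convert_to_soduku; infer_instance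

def pvWitness_convert_to_soduku : String × Int := ("123456789", 3)

def Spec_convert_to_soduku (line : String) (n : Int) (out : List (List Int)) : Prop :=
  out = convert_to_soduku_alt line n
instance (line : String) (n : Int) (out : List (List Int)) : Decidable (Spec_convert_to_soduku line n out) := by
  unfold Spec_convert_to_soduku; infer_instance

-- ===== CLAIM (what is proved, stated in full; the proofs are below) =====
def Claim_equal_convert_to_soduku : Prop := ∀ (line : String) (n : Int), Dom_convert_to_soduku line n → Pre_convert_to_soduku line n → Spec_convert_to_soduku line n (convert_to_soduku line n)

-- ===== LEMMAS AND PROOFS =====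

-- chunking a list into pieces of size m+1 (proof-side characterisation of both programs)
def pvChunks {α : Type} (m : Nat) : List α → List (List α)
  | [] => []
  | x :: xs => ((x :: xs).take (m + 1)) :: pvChunks m (xs.drop m)
termination_by l => l.length
decreasing_by
  simp only [List.length_drop, List.length_cons]
  omega

theorem pvChunks_nil {α : Type} (m : Nat) : pvChunks (α := α) m [] = [] := by
  rw [pvChunks.eq_1]

theorem pvChunks_cons {α : Type} (m : Nat) (x : α) (xs : List α) :
    pvChunks m (x :: xs) = ((x :: xs).take (m + 1)) :: pvChunks m ((x :: xs).drop (m + 1)) := by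
  rw [pvChunks.eq_2, List.drop_succ_cons]

-- chunking commutes with map
theorem pvChunks_map {α β : Type} (m : Nat) (f : α → β) (xs : List α) :
    pvChunks m (xs.map f) = (pvChunks m xs).map (List.map f) := by
  induction hl : xs.length using Nat.strong_induction_on generalizing xs with
  | _ L ih =>
    cases xs with
    | nil => simp [pvChunks_nil]
    | cons x t =>
      rw [List.map_cons, pvChunks_cons, pvChunks_cons, List.map_cons, ← List.map_cons,
          ← List.map_take, ← List.map_drop]
      subst hl
      rw [ih ((x :: t).drop (m + 1)).length (by simp) _ rfl]

-- range with a negative step starting at 0 and a nonnegative stop is empty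
theorem pv_pyRange_neg_nil (s L : Int) (hs : s < 0) (hL : 0 ≤ L) :
    PySem.List.pyRange 0 L s = [] := by
  simp only [PySem.List.pyRange]
  split_ifs with h1 h2 h3 h3 <;> first | rfl | omega

-- A's inner per-character parse loop over a chunk r is the map of the single-char parse over r
theorem pv_inner_eq (r : List Char) :
    (PySem.List.pyRange 0 (PySem.List.len r) 1).map
      (fun i => (PySem.Int.ofChars? (PySem.List.slice r (some i) (some (i + 1)))).getD 0)
    = r.map (fun c => (PySem.Int.ofChars? [c]).getD 0) := by
  conv_rhs => rw [← PySem.List.map_pyGetD_pyRange_zero r '0', List.map_map]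
  refine List.map_congr_left ?_
  intro i hi
  rw [PySem.List.mem_pyRange_one] at hi
  obtain ⟨h0, h1⟩ := hi
  have hlen : i.toNat < r.length := by
    simp [PySem.List.len] at h1; omega
  have hslice : PySem.List.slice r (some i) (some (i + 1)) = [r[i.toNat]] := by
    rw [PySem.List.slice_toNat r h0 (by omega)]
    have : (i + 1).toNat = i.toNat + 1 := by omega
    rw [this, Nat.add_sub_cancel_left, List.drop_eq_getElem_cons hlen]
    rfl
  have hget : PySem.List.pyGetD r i '0' = r[i.toNat] :=
    PySem.List.pyGetD_eq_getElem r '0' h0 (by simpa [PySem.List.len] using h1)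
  simp [hslice, hget]

-- a positive-step range from 0 decomposes into head 0 and the shifted tail
theorem pv_range_pos_cons (n L : Int) (hn : 0 < n) (hL : 0 < L) :
    PySem.List.pyRange 0 L n = 0 :: (PySem.List.pyRange 0 (L - n) n).map (· + n) := by
  rw [PySem.List.pyRange_of_pos 0 L hn, PySem.List.pyRange_of_pos 0 (L - n) hn]
  have hK : ((L - 0 + n - 1) / n) = ((L - n - 0 + n - 1) / n) + 1 := by
    have h1 : L - 0 + n - 1 = (L - n - 0 + n - 1) + 1 * n := by ring
    rw [h1, Int.add_mul_ediv_right _ _ (by omega)]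
  by_cases hLn : n < L
  · have hq : 0 ≤ (L - n - 0 + n - 1) / n := Int.ediv_nonneg (by omega) (by omega)
    rw [if_pos hL, if_pos (by omega), hK]
    have h2 : ((L - n - 0 + n - 1) / n + 1).toNat = ((L - n - 0 + n - 1) / n).toNat + 1 := by omega
    rw [h2, List.range_succ_eq_map, List.map_cons, List.map_map, List.map_map]
    congr 1
    · simp
    · apply List.map_congr_left; intro k _; simp; ring
  · have h1 : (L - 0 + n - 1) / n = 1 := by
      have h3 : L - 0 + n - 1 = (L - 1) + 1 * n := by ring
      rw [h3, Int.add_mul_ediv_right _ _ (by omega),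
          Int.ediv_eq_zero_of_lt (by omega) (by omega), zero_add]
    rw [if_pos hL, if_neg (by omega), h1]
    simp [List.range_succ_eq_map]

-- A's chunk-of-slices pass is pvChunks on the character list
theorem pv_A_chunks (cs : List Char) (n : Int) (hn : 0 < n) :
    (PySem.List.pyRange 0 (cs.length : Int) n).map
      (fun i => PySem.List.slice cs (some i) (some (i + n)))
    = pvChunks (n.toNat - 1) cs := by
  induction hl : cs.length using Nat.strong_induction_on generalizing cs with
  | _ L ih =>
    cases cs with
    | nil =>
      rw [pvChunks_nil, PySem.List.pyRange_of_pos _ _ hn]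
      simp at hl
      subst hl
      simp
    | cons x t =>
      subst hl
      have hnn : n.toNat - 1 + 1 = n.toNat := by omega
      rw [pvChunks_cons, hnn,
          pv_range_pos_cons n ((x :: t).length : Int) hn (by simp),
          List.map_cons, List.map_map]
      congr 1
      · rw [PySem.List.slice_toNat _ le_rfl (by omega)]
        simp
      · by_cases hbig : ((x :: t).length : Int) ≤ n
        · have h1 : PySem.List.pyRange 0 (((x :: t).length : Int) - n) n = [] := by
            rw [PySem.List.pyRange_of_pos _ _ hn, if_neg (by omega)]
            simp
          have h2 : (x :: t).drop n.toNat = [] := List.drop_eq_nil_of_le (by omega)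
          rw [h1, h2, pvChunks_nil]
          simp
        · have hbig' : ¬ ((t.length : Int) + 1 ≤ n) := by
            simpa using hbig
          have hdl : (((x :: t).drop n.toNat).length : Int) = (x :: t).length - n := by
            simp only [List.length_drop, List.length_cons]
            omega
          rw [← ih ((x :: t).drop n.toNat).length
                (by simp only [List.length_drop, List.length_cons]; omega) _ rfl, hdl]
          apply List.map_congr_left
          intro i hi
          obtain ⟨h0, -, -⟩ := (PySem.List.mem_pyRange_iff_of_pos hn i).mp hi
          simp only [Function.comp]
          rw [PySem.List.slice_toNat _ (by omega) (by omega),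
              PySem.List.slice_toNat _ h0 (by omega), List.drop_drop]
          have e1 : (i + n).toNat = i.toNat + n.toNat := by omega
          rw [e1]
          have e3 : (i + n + n).toNat - (i.toNat + n.toNat) = i.toNat + n.toNat - i.toNat := by
            omega
          rw [e3, Nat.add_comm n.toNat i.toNat]

-- B's loop invariant: folding the step over cs from (sudoku, row) and flushing the tail
-- appends the chunks of row ++ parsed cs, provided the pending row is shorter than n
theorem pv_B_fold (n : Int) (hn : 0 < n) (cs : List Char) :
    ∀ (sudoku : List (List Int)) (row : List Int), (row.length : Int) < n →
    (let st := cs.foldl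
        (fun (st : List (List Int) × List Int) c =>
          let row := st.2 ++ [(PySem.Int.ofChars? [c]).getD 0]
          if (row.length : Int) = n then (st.1 ++ [row], ([] : List Int)) else (st.1, row))
        (sudoku, row);
      if st.2 ≠ [] then st.1 ++ [st.2] else st.1)
    = sudoku ++ pvChunks (n.toNat - 1) (row ++ cs.map (fun c => (PySem.Int.ofChars? [c]).getD 0)) := by
  induction cs with
  | nil =>
    intro sudoku row hrow
    simp only [List.foldl_nil, List.map_nil, List.append_nil]
    cases row with
    | nil => simp [pvChunks_nil]
    | cons y ys =>
      rw [pvChunks_cons]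
      have h1 : (y :: ys).take (n.toNat - 1 + 1) = y :: ys := by
        apply List.take_of_length_le; simp at hrow ⊢; omega
      have h2 : (y :: ys).drop (n.toNat - 1 + 1) = [] := by
        apply List.drop_eq_nil_of_le; simp at hrow ⊢; omega
      rw [h1, h2, pvChunks_nil]
      simp
  | cons c t ih =>
    intro sudoku row hrow
    simp only [List.foldl_cons]
    set v := (PySem.Int.ofChars? [c]).getD 0 with hv
    by_cases hfull : ((row ++ [v]).length : Int) = n
    · simp only [if_pos hfull]
      rw [ih (sudoku ++ [row ++ [v]]) [] (by simpa using hn)]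
      have hsplit : row ++ (c :: t).map (fun c => (PySem.Int.ofChars? [c]).getD 0)
          = (row ++ [v]) ++ t.map (fun c => (PySem.Int.ofChars? [c]).getD 0) := by
        simp [hv]
      rw [hsplit]
      cases hrv : row ++ [v] with
      | nil => simp at hrv
      | cons z zs =>
        rw [List.cons_append, pvChunks_cons]
        have hlen : (z :: zs).length = n.toNat := by
          rw [← hrv]; simp at hfull ⊢; omega
        have h1 : ((z :: zs) ++ t.map (fun c => (PySem.Int.ofChars? [c]).getD 0)).take (n.toNat - 1 + 1)
            = z :: zs := by
          rw [List.take_append_of_le_length (by omega), List.take_of_length_le (by omega)]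
        have h2 : ((z :: zs) ++ t.map (fun c => (PySem.Int.ofChars? [c]).getD 0)).drop (n.toNat - 1 + 1)
            = t.map (fun c => (PySem.Int.ofChars? [c]).getD 0) := by
          rw [List.drop_append_of_le_length (by omega), List.drop_eq_nil_of_le (by omega),
              List.nil_append]
        rw [List.cons_append] at h1 h2
        rw [h1, h2]
        simp [List.append_assoc]
    · simp only [if_neg hfull]
      rw [ih sudoku (row ++ [v]) (by simp at hfull ⊢; omega)]
      simp [hv]

-- ===== VERDICT (by name: the statement is the Claim_ definition above) =====
theorem convert_to_soduku_spec : Claim_equal_convert_to_soduku := by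
  intro line n _ hpre
  unfold Spec_convert_to_soduku convert_to_soduku convert_to_soduku_alt
  rcases lt_trichotomy n 0 with hn | hn | hn
  · rw [if_pos (by omega)]
    rw [show PySem.Str.len line = (line.toList.length : Int) from by simp [PySem.Str.len_eq],
        pv_pyRange_neg_nil n _ hn (by positivity)]
    rfl
  · exact absurd hn hpre.1
  · rw [if_neg (by omega)]
    rw [PySem.List.foldl_append_singleton_eq_map, List.nil_append,
        show PySem.Str.len line = (line.toList.length : Int) from by simp [PySem.Str.len_eq],
        List.map_map]
    have hB := pv_B_fold n hn line.toList [] [] (by simpa using hn)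
    simp only [List.nil_append] at hB
    refine Eq.trans ?_ hB.symm
    rw [pvChunks_map, ← pv_A_chunks line.toList n hn, List.map_map]
    apply List.map_congr_left
    intro i _
    simp only [Function.comp]
    exact pv_inner_eq _
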